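-- pv_equiv track=rewrite | github.com/drizztSun/common_project | PythonLeetcode/LeetCodeE/523_ContinuousSubarraySum.py | doit1
-- ===== SOURCE A (Python) =====
-- def doit1(nums, k):
--     """
--     :type nums: List[int]
--     :type k: int
--     :rtype: bool
--     """
--     from collections import Counter
--     remains = [ nums[x] % 6 for x in range(len(nums))]
--     cnt = Counter(remains)
--     keys = list(cnt.keys())
--
--     def search(i, total):
--         if total > 0 and total % 6 == 0:
--             return True
--
--         for j in range(i, len(keys)):
--             if cnt[keys[j]] > 0:
--                 cnt[keys[j]] -= 1
--                 if search(j, total + keys[j]):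
--                     return True
--                 cnt[keys[j]] += 1
--
--         return False
--
--     return search(0, 0)
-- ===== SOURCE B (Python) =====
-- def doit1(nums, k):
--     # DP over residues mod 6: reach = residues attainable as the sum (mod 6) of a
--     # nonempty sub-multiset of the nonzero residues seen so far; succeed early.
--     reach = set()
--     for v in nums:
--         r = v % 6
--         if r:
--             reach |= {(x + r) % 6 for x in reach}
--             reach.add(r)
--             if 0 in reach:
--                 return True
--     return 0 in reach
-- ===== Notes on version B (the rewrite author's own statement) =====
-- stated objective: faster
-- what changed: Replaced A's exponential backtracking search over a Counter of residues by a single left-to-right pass maintaining the set of residues mod 6 reachable as sums of nonempty sub-multisets of the nonzero residues, returning True as soon as residue 0 is reachable.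
import Mathlib
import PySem

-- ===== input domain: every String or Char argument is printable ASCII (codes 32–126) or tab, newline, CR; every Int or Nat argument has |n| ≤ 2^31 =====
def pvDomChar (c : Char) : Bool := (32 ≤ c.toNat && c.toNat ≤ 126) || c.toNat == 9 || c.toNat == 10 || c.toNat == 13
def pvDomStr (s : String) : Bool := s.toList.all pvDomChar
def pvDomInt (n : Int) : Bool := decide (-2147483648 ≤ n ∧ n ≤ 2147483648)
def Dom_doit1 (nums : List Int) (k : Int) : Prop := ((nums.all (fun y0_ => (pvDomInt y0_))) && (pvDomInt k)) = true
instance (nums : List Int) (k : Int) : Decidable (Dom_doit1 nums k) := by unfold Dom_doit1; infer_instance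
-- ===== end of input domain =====

-- B replaces A's exponential backtracking over residue counts by a linear DP over
-- reachable residues mod 6 (objective: faster). Return-value equivalence only.

-- ===== PORT A =====
-- measure used only for termination of the backtracking search
def pvMeasure (keys : List Int) (cnt : PySem.Dict Int Int) : Nat :=
  (keys.map (fun r => (cnt.getD r 0).toNat)).sum

theorem pvTerm_le (cnt : PySem.Dict Int Int) (key a : Int) :
    ((cnt.modify key 0 (· - 1)).getD a 0).toNat ≤ (cnt.getD a 0).toNat := by
  rw [PySem.Dict.getD_modify]
  split_ifs with h
  · rw [h]; omega
  · exact le_refl _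

theorem pvMeasure_modify_le (keys : List Int) (cnt : PySem.Dict Int Int) (key : Int) :
    pvMeasure keys (cnt.modify key 0 (· - 1)) ≤ pvMeasure keys cnt := by
  induction keys with
  | nil => simp [pvMeasure]
  | cons a tl ih =>
    simp only [pvMeasure, List.map_cons, List.sum_cons] at *
    have h := pvTerm_le cnt key a
    omega

theorem pvMeasure_modify_lt (keys : List Int) (cnt : PySem.Dict Int Int) (key : Int)
    (hmem : key ∈ keys) (hpos : 0 < cnt.getD key 0) :
    pvMeasure keys (cnt.modify key 0 (· - 1)) < pvMeasure keys cnt := by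
  induction keys with
  | nil => simp at hmem
  | cons a tl ih =>
    simp only [pvMeasure, List.map_cons, List.sum_cons] at *
    rcases List.mem_cons.mp hmem with h | h
    · have h1 : ((cnt.modify key 0 (· - 1)).getD a 0).toNat < (cnt.getD a 0).toNat := by
        rw [h, PySem.Dict.getD_modify_self]; rw [h] at hpos; omega
      have h2 := pvMeasure_modify_le tl cnt key
      simp only [pvMeasure] at h2
      omega
    · have h1 := pvTerm_le cnt key a
      have h2 := ih h
      omega

mutual
-- 'def search(i, total)' of A
def pvSearch (cnt : PySem.Dict Int Int) (keys : List Int) (i : Nat) (total : Int) : Bool :=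
  if 0 < total ∧ PySem.Int.mod total 6 = 0 then true
  else pvLoop cnt keys i total
termination_by (pvMeasure keys cnt, keys.length - i + 1)
decreasing_by apply Prod.Lex.right' (h₁ := le_refl _); omega
-- the 'for j in range(i, len(keys))' loop of search, entered at index j
def pvLoop (cnt : PySem.Dict Int Int) (keys : List Int) (j : Nat) (total : Int) : Bool :=
  if h : j < keys.length then
    if 0 < cnt.getD keys[j] 0 then
      -- cnt[keys[j]] -= 1 ; recursive call ; (restore on failure = continue with cnt)
      if pvSearch (cnt.modify keys[j] 0 (· - 1)) keys j (total + keys[j]) then true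
      else pvLoop cnt keys (j + 1) total
    else pvLoop cnt keys (j + 1) total
  else false
termination_by (pvMeasure keys cnt, keys.length - j)
decreasing_by
  · apply Prod.Lex.left
    exact pvMeasure_modify_lt _ _ _ (List.getElem_mem h) (by assumption)
  · apply Prod.Lex.right' <;> omega
  · apply Prod.Lex.right' <;> omega
end

def doit1 (nums : List Int) (k : Int) : Bool :=
  let remains := (PySem.List.pyRange 0 (nums.length : Int) 1).map
      (fun x => PySem.Int.mod (PySem.List.pyGetD nums x 0) 6)
  let cnt := PySem.Dict.counter remains
  let keys := cnt.keys
  pvSearch cnt keys 0 0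

-- ===== PORT B =====
-- the 'for v in nums' loop of B, with its early 'return True'
def pvAltLoop (reach : PySem.Set Int) : List Int → Bool
  | [] => PySem.Set.contains reach 0
  | v :: tl =>
    let r := PySem.Int.mod v 6
    if r ≠ 0 then
      let reach' := PySem.Set.add (PySem.Set.union reach
        (reach.map (fun x => PySem.Int.mod (x + r) 6))) r
      if PySem.Set.contains reach' 0 then true
      else pvAltLoop reach' tl
    else pvAltLoop reach tl

def doit1_alt (nums : List Int) (k : Int) : Bool :=
  pvAltLoop PySem.Set.empty nums

-- ===== PRECONDITION & SPEC =====
def Spec_doit1 (nums : List Int) (k : Int) (out : Bool) : Prop := out = doit1_alt nums k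
instance (nums : List Int) (k : Int) (out : Bool) : Decidable (Spec_doit1 nums k out) := by unfold Spec_doit1; infer_instance

-- ===== CLAIM (what is proved, stated in full; the proofs are below) =====
def Claim_equal_doit1 : Prop := ∀ (nums : List Int) (k : Int), Dom_doit1 nums k → Spec_doit1 nums k (doit1 nums k)

-- ===== LEMMAS AND PROOFS =====

theorem pvmod6 (v : Int) : PySem.Int.mod v 6 = v % 6 :=
  PySem.Int.mod_eq_emod_of_pos (by norm_num)

-- the residues list and its nonzero part
def pvR (nums : List Int) : List Int := nums.map (fun v => v % 6)
def pvNZ (nums : List Int) : List Int := (pvR nums).filter (fun r => r ≠ 0)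

-- "some nonempty sub-multiset of the nonzero residues sums to a multiple of 6"
def PvGood (nums : List Int) : Prop :=
  ∃ s : List Int, s ≠ [] ∧ List.Sublist s (pvNZ nums) ∧ s.sum % 6 = 0

-- what search(i, total) finds: a multiset of available keys from keys[i:] completing total
def PvPicks (cnt : PySem.Dict Int Int) (keys : List Int) (i : Nat) (total : Int) : Prop :=
  ∃ picks : List Int, (∀ r : Int, (picks.count r : Int) ≤ cnt.getD r 0) ∧
    (∀ r ∈ picks, r ∈ keys.drop i) ∧ 0 < total + picks.sum ∧ (total + picks.sum) % 6 = 0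

theorem pvLoop_iff (cnt : PySem.Dict Int Int) (keys : List Int) (total : Int) (j : Nat) :
    pvLoop cnt keys j total = true ↔
      ∃ j', j ≤ j' ∧ ∃ h : j' < keys.length, 0 < cnt.getD keys[j'] 0 ∧
        pvSearch (cnt.modify keys[j'] 0 (· - 1)) keys j' (total + keys[j']) = true := by
  generalize hd : keys.length - j = d
  induction d generalizing j with
  | zero =>
    rw [pvLoop]
    have hj : ¬ j < keys.length := by omega
    simp only [hj, dif_neg, not_false_iff]
    constructor
    · intro h; exact absurd h (by simp)
    · rintro ⟨j', hjj, hlt, -⟩; omega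
  | succ d ihd =>
    have hj : j < keys.length := by omega
    rw [pvLoop]
    simp only [hj, dif_pos]
    have hrec := ihd (j + 1) (by omega)
    constructor
    · intro h
      split_ifs at h with hpos hs
      · exact ⟨j, le_refl _, hj, hpos, hs⟩
      · obtain ⟨j', h1, h2, h3, h4⟩ := hrec.mp h
        exact ⟨j', by omega, h2, h3, h4⟩
      · obtain ⟨j', h1, h2, h3, h4⟩ := hrec.mp h
        exact ⟨j', by omega, h2, h3, h4⟩
    · rintro ⟨j', h1, h2, h3, h4⟩
      rcases eq_or_lt_of_le h1 with rfl | hlt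
      · simp [h3, h4]
      · have hnext : pvLoop cnt keys (j + 1) total = true :=
          hrec.mpr ⟨j', by omega, h2, h3, h4⟩
        split_ifs <;> simp_all

theorem pvList_min (l : List Nat) (h : l ≠ []) : ∃ m ∈ l, ∀ x ∈ l, m ≤ x := by
  induction l with
  | nil => simp at h
  | cons a tl ih =>
    rcases tl with _ | ⟨b, tl2⟩
    · exact ⟨a, by simp⟩
    · obtain ⟨m, hm, hmin⟩ := ih (by simp)
      rcases le_total a m with hle | hle
      · refine ⟨a, by simp, ?_⟩
        intro x hx
        rcases List.mem_cons.mp hx with rfl | hx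
        · exact le_refl _
        · exact le_trans hle (hmin x hx)
      · refine ⟨m, List.mem_cons_of_mem _ hm, ?_⟩
        intro x hx
        rcases List.mem_cons.mp hx with rfl | hx
        · exact hle
        · exact hmin x hx

theorem pvMem_drop_of_index (keys : List Int) (i q : Nat) (hq : q < keys.length)
    (hiq : i ≤ q) : keys[q] ∈ keys.drop i := by
  have h1 : q - i < (keys.drop i).length := by
    rw [List.length_drop]; omega
  have h2 : (keys.drop i)[q - i] = keys[q] := by
    rw [List.getElem_drop]
    congr 1
    omega
  exact h2 ▸ List.getElem_mem h1

theorem pvIdxOf_ge (keys : List Int) (i : Nat) (r : Int) (hnd : keys.Nodup)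
    (h : r ∈ keys.drop i) : i ≤ keys.idxOf r ∧ r ∈ keys := by
  obtain ⟨q, hq, heq⟩ := List.getElem_of_mem h
  have hlen : i + q < keys.length := by
    have := hq; rw [List.length_drop] at this; omega
  have heq2 : keys[i + q] = r := by rw [← List.getElem_drop]; exact heq
  have hmem : r ∈ keys := heq2 ▸ List.getElem_mem hlen
  have hidx : keys.idxOf r < keys.length := List.idxOf_lt_length_of_mem hmem
  have hge : keys[keys.idxOf r] = r := List.getElem_idxOf hidx
  have := (List.Nodup.getElem_inj_iff hnd).mp (hge.trans heq2.symm)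
  exact ⟨by omega, hmem⟩

theorem pvSearch_iff (n : Nat) (cnt : PySem.Dict Int Int) (keys : List Int) (i : Nat)
    (total : Int) (hm : pvMeasure keys cnt = n) (hnd : keys.Nodup)
    (hnn : ∀ r : Int, 0 ≤ cnt.getD r 0) :
    (pvSearch cnt keys i total = true ↔ PvPicks cnt keys i total) := by
  induction n using Nat.strong_induction_on generalizing cnt i total with
  | _ n ih =>
  rw [pvSearch]
  by_cases hc : 0 < total ∧ PySem.Int.mod total 6 = 0
  · rw [if_pos hc]
    simp only [true_iff]
    refine ⟨[], by intro r; simpa using hnn r, by simp, by simpa using hc.1, ?_⟩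
    simp only [List.sum_nil, add_zero]
    rw [← pvmod6]
    exact hc.2
  · rw [if_neg hc, pvLoop_iff]
    constructor
    · rintro ⟨j', hij, hlt, hpos, hs⟩
      have hm' : pvMeasure keys (cnt.modify keys[j'] 0 (· - 1)) < n :=
        hm ▸ pvMeasure_modify_lt keys cnt keys[j'] (List.getElem_mem hlt) hpos
      have hnn' : ∀ r : Int, 0 ≤ (cnt.modify keys[j'] 0 (· - 1)).getD r 0 := by
        intro r
        rw [PySem.Dict.getD_modify]
        split_ifs with h
        · omega
        · exact hnn r
      obtain ⟨picks, hcnt, hmemz, hpos2, hmod⟩ :=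
        (ih _ hm' _ j' _ rfl hnn').mp hs
      refine ⟨keys[j'] :: picks, ?_, ?_, ?_, ?_⟩
      · intro r
        have h1 := hcnt r
        rw [PySem.Dict.getD_modify] at h1
        rw [List.count_cons]
        by_cases hr : r = keys[j']
        · subst hr
          rw [if_pos rfl] at h1
          simp only [beq_self_eq_true, if_true]
          push_cast
          omega
        · rw [if_neg hr] at h1
          simp only [beq_iff_eq, if_neg (Ne.symm hr)]
          simpa using h1
      · intro r hr
        rcases List.mem_cons.mp hr with rfl | hr
        · exact pvMem_drop_of_index keys i j' hlt hij
        · have h2 := hmemz r hr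
          have hsub : keys.drop j' ⊆ keys.drop i := by
            have : keys.drop j' = (keys.drop i).drop (j' - i) := by
              rw [List.drop_drop]
              congr 1
              omega
            rw [this]
            exact List.drop_subset _ _
          exact hsub h2
      · simp only [List.sum_cons]
        have : total + (keys[j'] + picks.sum) = total + keys[j'] + picks.sum := by ring
        omega
      · have : total + (keys[j'] :: picks).sum = total + keys[j'] + picks.sum := by
          simp [List.sum_cons]; ring
        rw [this]
        exact hmod
    · rintro ⟨picks, hcnt, hmemz, hpos2, hmod⟩
      have hne : picks ≠ [] := by
        rintro rfl
        simp only [List.sum_nil, add_zero] at hpos2 hmod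
        exact hc ⟨hpos2, by rw [pvmod6]; exact hmod⟩
      obtain ⟨m, hmJ, hmin⟩ := pvList_min (picks.map (fun r => keys.idxOf r))
        (by simpa using hne)
      obtain ⟨r0, hr0, hr0idx⟩ := List.mem_map.mp hmJ
      have h0 := pvIdxOf_ge keys i r0 hnd (hmemz r0 hr0)
      have hidxlt : keys.idxOf r0 < keys.length := List.idxOf_lt_length_of_mem h0.2
      have hmlt : m < keys.length := hr0idx ▸ hidxlt
      have hkey : keys[m] = r0 := by
        subst hr0idx
        exact List.getElem_idxOf hidxlt
      have him : i ≤ m := hr0idx ▸ h0.1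
      have hcountpos : 0 < picks.count r0 := List.count_pos_iff.mpr hr0
      have hposr0 : 0 < cnt.getD r0 0 := by
        have := hcnt r0
        omega
      have hm' : pvMeasure keys (cnt.modify keys[m] 0 (· - 1)) < n :=
        hm ▸ pvMeasure_modify_lt keys cnt keys[m] (List.getElem_mem hmlt) (hkey ▸ hposr0)
      have hnn' : ∀ r : Int, 0 ≤ (cnt.modify keys[m] 0 (· - 1)).getD r 0 := by
        intro r
        rw [PySem.Dict.getD_modify]
        split_ifs with h
        · have := hnn keys[m]
          have h2 : 0 < cnt.getD keys[m] 0 := hkey ▸ hposr0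
          omega
        · exact hnn r
      have hsearch : pvSearch (cnt.modify keys[m] 0 (· - 1)) keys m (total + keys[m]) = true := by
        apply (ih _ hm' _ m _ rfl hnn').mpr
        refine ⟨picks.erase r0, ?_, ?_, ?_, ?_⟩
        · intro r
          rw [PySem.Dict.getD_modify, List.count_erase, hkey]
          by_cases hr : r = r0
          · subst hr
            have h1 := hcnt r
            have h2 := hcountpos
            simp only [beq_self_eq_true, if_true]
            omega
          · rw [if_neg hr, beq_eq_false_iff_ne.mpr (Ne.symm hr)]
            simpa using hcnt r
        · intro r hr
          have hrp : r ∈ picks := List.mem_of_mem_erase hr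
          have hidxr := (pvIdxOf_ge keys i r hnd (hmemz r hrp))
          have hmr : m ≤ keys.idxOf r := hmin _ (List.mem_map.mpr ⟨r, hrp, rfl⟩)
          have hlt2 : keys.idxOf r < keys.length := List.idxOf_lt_length_of_mem hidxr.2
          have := pvMem_drop_of_index keys m (keys.idxOf r) hlt2 hmr
          rwa [List.getElem_idxOf hlt2] at this
        · have hsum : r0 + (picks.erase r0).sum = picks.sum := List.sum_erase hr0
          rw [hkey]
          omega
        · have hsum : r0 + (picks.erase r0).sum = picks.sum := List.sum_erase hr0
          rw [hkey]
          have : total + r0 + (picks.erase r0).sum = total + picks.sum := by omega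
          rw [this]
          exact hmod
      exact ⟨m, him, hmlt, hkey ▸ hposr0, hsearch⟩

-- A-side characterization
theorem pvR_eq (nums : List Int) :
    (PySem.List.pyRange 0 (nums.length : Int) 1).map
      (fun x => PySem.Int.mod (PySem.List.pyGetD nums x 0) 6) = pvR nums := by
  have h1 : (PySem.List.pyRange 0 (nums.length : Int) 1).map
      (fun x => PySem.Int.mod (PySem.List.pyGetD nums x 0) 6)
      = ((PySem.List.pyRange 0 (nums.length : Int) 1).map
          (fun x => PySem.List.pyGetD nums x 0)).map (fun t => PySem.Int.mod t 6) := by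
    rw [List.map_map]
    rfl
  rw [h1, PySem.List.map_pyGetD_pyRange_zero']
  unfold pvR
  exact List.map_congr_left (fun v _ => pvmod6 v)

theorem pvA_iff (nums : List Int) (k : Int) : doit1 nums k = true ↔ PvGood nums := by
  show pvSearch (PySem.Dict.counter _) _ 0 0 = true ↔ _
  rw [pvR_eq]
  have hkeys : (PySem.Dict.counter (pvR nums)).keys = PySem.Set.ofList (pvR nums) :=
    PySem.Dict.keys_counter _
  have hnd : (PySem.Dict.counter (pvR nums)).keys.Nodup := by
    rw [hkeys]; exact PySem.Set.nodup_ofList _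
  have hget : ∀ r : Int, (PySem.Dict.counter (pvR nums)).getD r 0 = ((pvR nums).count r : Int) :=
    fun r => PySem.Dict.getD_counter _ _
  have hnn : ∀ r : Int, 0 ≤ (PySem.Dict.counter (pvR nums)).getD r 0 := by
    intro r; rw [hget]; positivity
  rw [pvSearch_iff _ _ _ 0 0 rfl hnd hnn]
  unfold PvPicks PvGood
  constructor
  · rintro ⟨picks, hcnt, -, hpos, hmod⟩
    simp only [zero_add] at hpos hmod
    set s0 := picks.filter (fun r => decide (r ≠ 0)) with hs0
    have hsum0 : s0.sum = picks.sum := by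
      rw [hs0]
      clear hs0 hpos hmod hcnt
      induction picks with
      | nil => simp
      | cons a tl ih =>
        by_cases ha : a = 0
        · rw [List.filter_cons, if_neg (by simp [ha]), ih, List.sum_cons, ha, zero_add]
        · rw [List.filter_cons, if_pos (by simpa using ha), List.sum_cons, List.sum_cons, ih]
    have hsne : s0 ≠ [] := by
      intro h
      rw [h] at hsum0
      simp at hsum0
      omega
    have hsp : s0.Subperm (pvNZ nums) := by
      rw [List.subperm_ext_iff]
      intro x hx
      have hxne : x ≠ 0 := by
        have := List.of_mem_filter hx
        simpa using this
      have hc1 : s0.count x = picks.count x := by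
        rw [hs0, List.count_filter]
        simp [hxne]
      have hc2 : (pvNZ nums).count x = (pvR nums).count x := by
        unfold pvNZ
        rw [List.count_filter]
        simp [hxne]
      have := hcnt x
      rw [hget x] at this
      rw [hc1, hc2]
      exact_mod_cast this
    obtain ⟨s', hperm, hsub⟩ := hsp
    refine ⟨s', ?_, hsub, ?_⟩
    · rintro rfl
      exact hsne hperm.symm.eq_nil
    · rw [hperm.sum_eq, hsum0]
      exact hmod
  · rintro ⟨s, hne, hsub, hmod⟩
    have hmemR : ∀ r ∈ s, r ∈ pvNZ nums := fun r hr => hsub.subset hr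
    have hposel : ∀ r ∈ s, 0 < r := by
      intro r hr
      have h2 := hmemR r hr
      unfold pvNZ at h2
      have h3 := List.of_mem_filter h2
      have h4 : r ∈ pvR nums := List.mem_of_mem_filter h2
      unfold pvR at h4
      obtain ⟨v, -, rfl⟩ := List.mem_map.mp h4
      have h5 : 0 ≤ v % 6 := Int.emod_nonneg v (by norm_num)
      have h6 : v % 6 ≠ 0 := by simpa using h3
      omega
    refine ⟨s, ?_, ?_, ?_, ?_⟩
    · intro r
      rw [hget r]
      have h1 : s.count r ≤ (pvNZ nums).count r := hsub.count_le r
      have h2 : (pvNZ nums).count r ≤ (pvR nums).count r := by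
        unfold pvNZ
        have h : ((pvR nums).filter (fun r => decide (r ≠ 0))).Sublist (pvR nums) :=
          List.filter_sublist
        exact h.count_le r
      exact_mod_cast le_trans h1 h2
    · intro r hr
      rw [List.drop_zero, hkeys, PySem.Set.mem_ofList]
      exact List.mem_of_mem_filter (hmemR r hr)
    · rw [zero_add]
      exact List.sum_pos s hposel hne

    · rw [zero_add]
      exact hmod

-- B-side: the fold's reach set collects exactly the residues of nonempty sublist sums
theorem pvNZ_cons (v : Int) (tl : List Int) :
    pvNZ (v :: tl) = (if v % 6 ≠ 0 then [v % 6] else []) ++ pvNZ tl := by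
  unfold pvNZ pvR
  rw [List.map_cons, List.filter_cons]
  split_ifs with h1 h2 h3
  · rfl
  · exact absurd (by simpa using h1) h2
  · exact absurd (by simpa using h3) h1
  · rfl

theorem pvB_loop (l : List Int) (reach : PySem.Set Int) (p : List Int)
    (hinv : ∀ x : Int, x ∈ reach ↔ ∃ s : List Int, s ≠ [] ∧ List.Sublist s p ∧ s.sum % 6 = x) :
    (pvAltLoop reach l = true ↔
      ∃ s : List Int, s ≠ [] ∧ List.Sublist s (p ++ pvNZ l) ∧ s.sum % 6 = 0) := by
  induction l generalizing reach p with
  | nil =>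
    rw [pvAltLoop, PySem.Set.contains_iff]
    simpa [pvNZ, pvR] using hinv 0
  | cons v tl ih =>
    rw [pvAltLoop]
    by_cases hr : PySem.Int.mod v 6 ≠ 0
    · have hr6 : v % 6 ≠ 0 := by rwa [pvmod6] at hr
      have hstep : ∀ y : Int, (y ∈ PySem.Set.add (PySem.Set.union reach
          (reach.map (fun x => PySem.Int.mod (x + PySem.Int.mod v 6) 6))) (PySem.Int.mod v 6)) ↔
          ∃ s : List Int, s ≠ [] ∧ List.Sublist s (p ++ [v % 6]) ∧ s.sum % 6 = y := by
        intro y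
        rw [PySem.Set.mem_add, PySem.Set.mem_union]
        constructor
        · rintro (⟨hy | hy⟩ | hy)
          · obtain ⟨s, hne, hsub, hsum⟩ := (hinv y).mp hy
            exact ⟨s, hne, hsub.trans (List.sublist_append_left p [v % 6]), hsum⟩
          · obtain ⟨z, hz, rfl⟩ := List.mem_map.mp hy
            obtain ⟨s, hne, hsub, hsum⟩ := (hinv z).mp hz
            refine ⟨s ++ [v % 6], by simp, hsub.append (List.Sublist.refl _), ?_⟩
            rw [List.sum_append, List.sum_singleton, pvmod6, pvmod6, ← hsum]
            rw [Int.emod_add_emod]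
          · rw [pvmod6] at hy
            subst hy
            refine ⟨[v % 6], by simp, ?_, ?_⟩
            · exact List.nil_append [v % 6] ▸ (List.nil_sublist p).append (List.Sublist.refl [v % 6])
            · rw [List.sum_singleton, Int.emod_emod_of_dvd v (dvd_refl 6)]
        · rintro ⟨s, hne, hsub, hsum⟩
          obtain ⟨s₁, s₂, rfl, hsub1, hsub2⟩ := List.sublist_append_iff.mp hsub
          rcases List.sublist_singleton.mp hsub2 with rfl | rfl
          · rw [List.append_nil] at hne hsum
            exact Or.inl (Or.inl ((hinv y).mpr ⟨s₁, hne, hsub1, hsum⟩))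
          · rcases eq_or_ne s₁ [] with rfl | hs1
            · right
              rw [List.nil_append, List.sum_singleton] at hsum
              rw [← hsum, pvmod6, Int.emod_emod_of_dvd v (dvd_refl 6)]
            · left; right
              rw [List.mem_map]
              refine ⟨s₁.sum % 6, (hinv _).mpr ⟨s₁, hs1, hsub1, rfl⟩, ?_⟩
              rw [pvmod6, pvmod6, Int.emod_add_emod, ← hsum, List.sum_append,
                List.sum_singleton]
      have hgoal := ih (PySem.Set.add (PySem.Set.union reach
          (reach.map (fun x => PySem.Int.mod (x + PySem.Int.mod v 6) 6))) (PySem.Int.mod v 6))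
          (p ++ [v % 6]) hstep
      rw [pvNZ_cons, if_pos hr6, ← List.append_assoc]
      rw [if_pos hr]
      by_cases h0 : PySem.Set.contains (PySem.Set.add (PySem.Set.union reach
          (reach.map (fun x => PySem.Int.mod (x + PySem.Int.mod v 6) 6))) (PySem.Int.mod v 6)) 0
      · rw [if_pos h0]
        rw [PySem.Set.contains_iff] at h0
        obtain ⟨s, hne, hsub, hsum⟩ := (hstep 0).mp h0
        simp only [true_iff]
        exact ⟨s, hne, hsub.trans (List.sublist_append_left _ (pvNZ tl)), hsum⟩
      · rw [if_neg h0]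
        exact hgoal
    · have hr6 : ¬ v % 6 ≠ 0 := by rwa [pvmod6] at hr
      rw [pvNZ_cons, if_neg hr6, List.nil_append, if_neg hr]
      exact ih reach p hinv

theorem pvB_iff (nums : List Int) (k : Int) : doit1_alt nums k = true ↔ PvGood nums := by
  show pvAltLoop PySem.Set.empty nums = true ↔ _
  have hinv : ∀ x : Int, x ∈ (PySem.Set.empty : PySem.Set Int) ↔
      ∃ s : List Int, s ≠ [] ∧ List.Sublist s [] ∧ s.sum % 6 = x := by
    intro x
    constructor
    · intro h; exact absurd h (by simp [PySem.Set.empty])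
    · rintro ⟨s, h1, h2, -⟩; exact absurd (List.sublist_nil.mp h2) h1
  rw [pvB_loop nums PySem.Set.empty [] hinv]
  unfold PvGood
  simp

-- ===== VERDICT (by name: the statement is the Claim_ definition above) =====
theorem doit1_spec : Claim_equal_doit1 := by
  intro nums k _
  unfold Spec_doit1
  by_cases h : PvGood nums
  · rw [(pvA_iff nums k).mpr h, ((pvB_iff nums k).mpr h)]
  · rcases Bool.eq_false_or_eq_true (doit1 nums k) with h1 | h1 <;>
    rcases Bool.eq_false_or_eq_true (doit1_alt nums k) with h2 | h2 <;>
    simp_all [pvA_iff nums k, pvB_iff nums k]
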